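-- pv_equiv track=rewrite | github.com/rooz-live/agentic-flow | scripts/superproject-gates/swarm_compare_automation.py | _determine_overall_trend
-- ===== SOURCE A (Python) =====
-- from typing import Any, Dict, List, Optional, Tuple, Union
--
-- def _determine_overall_trend(metrics: Dict[str, Any]) -> str:
--     """Determine overall performance trend"""
--     trends = []
--
--     for metric_name, metric_data in metrics.items():
--         if isinstance(metric_data, dict) and "trend" in metric_data:
--             trends.append(metric_data["trend"])
--
--     if not trends:
--         return "unknown"
--
--     improving_count = trends.count("improving")
--     declining_count = trends.count("declining")
--
--     if improving_count > declining_count: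
--         return "positive"
--     elif declining_count > improving_count:
--         return "negative"
--     else:
--         return "neutral"
-- ===== SOURCE B (Python) =====
-- def _determine_overall_trend(metrics):
--     """Determine overall performance trend (single-pass signed accumulator)."""
--     seen = False
--     net = 0
--     for metric_data in metrics.values():
--         if isinstance(metric_data, dict) and "trend" in metric_data:
--             seen = True
--             t = metric_data["trend"]
--             if t == "improving":
--                 net += 1
--             elif t == "declining":
--                 net -= 1
--     if not seen:
--         return "unknown"
--     if net > 0:
--         return "positive"
--     if net < 0:
--         return "negative"
--     return "neutral"
-- ===== Notes on version B (the rewrite author's own statement) =====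
-- stated objective: simpler
-- what changed: Replaced the build-a-trends-list-then-count-twice structure with a single fold that keeps a seen flag and a signed net score (+1 improving, -1 declining) and classifies by the sign of the net.
import Mathlib
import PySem

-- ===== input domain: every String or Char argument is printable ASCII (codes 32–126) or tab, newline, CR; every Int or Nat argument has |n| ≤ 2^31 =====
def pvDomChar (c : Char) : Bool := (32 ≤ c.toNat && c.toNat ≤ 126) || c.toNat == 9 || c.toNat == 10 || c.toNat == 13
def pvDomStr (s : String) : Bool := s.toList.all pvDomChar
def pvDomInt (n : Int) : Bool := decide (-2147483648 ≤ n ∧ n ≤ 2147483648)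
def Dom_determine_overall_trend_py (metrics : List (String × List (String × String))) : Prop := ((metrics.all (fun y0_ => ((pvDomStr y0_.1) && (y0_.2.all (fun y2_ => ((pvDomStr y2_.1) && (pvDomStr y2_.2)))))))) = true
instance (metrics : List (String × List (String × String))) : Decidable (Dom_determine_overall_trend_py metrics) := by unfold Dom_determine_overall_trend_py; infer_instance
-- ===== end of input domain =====

-- B replaces A's build-a-trends-list-then-count-twice structure with a single fold
-- keeping a seen flag and a signed net score; classification is by the sign of the net.

-- ===== PORT A =====
-- A: collect the "trend" values into a list, then count "improving" and "declining" in it.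
-- (the Lean type makes every metric value a dict, so Python's isinstance check is always true)
def determine_overall_trend_py (metrics : List (String × List (String × String))) : String :=
  let trends := metrics.foldl (fun acc md =>
    match (PySem.Dict.mk md.2).get? "trend" with   -- '"trend" in metric_data' + metric_data["trend"]
    | some t => acc ++ [t]
    | none => acc) ([] : List String)
  if trends = [] then "unknown"
  else
    let improving_count := PySem.List.count trends "improving"
    let declining_count := PySem.List.count trends "declining"
    if improving_count > declining_count then "positive"
    else if declining_count > improving_count then "negative"
    else "neutral"

-- ===== PORT B =====
-- B: one pass, a (seen, net) accumulator; +1 for "improving", -1 for "declining".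
def determine_overall_trend_py_alt (metrics : List (String × List (String × String))) : String :=
  let st := metrics.foldl (fun (st : Bool × Int) md =>
    match (PySem.Dict.mk md.2).get? "trend" with
    | some t => (true, st.2 + (if t = "improving" then 1 else if t = "declining" then -1 else 0))
    | none => st) ((false, 0) : Bool × Int)
  if st.1 = false then "unknown"
  else if st.2 > 0 then "positive"
  else if st.2 < 0 then "negative"
  else "neutral"

-- ===== PRECONDITION & SPEC =====
def Spec_determine_overall_trend_py (metrics : List (String × List (String × String))) (out : String) : Prop := out = determine_overall_trend_py_alt metrics
instance (metrics : List (String × List (String × String))) (out : String) : Decidable (Spec_determine_overall_trend_py metrics out) := by unfold Spec_determine_overall_trend_py; infer_instance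

-- ===== CLAIM (what is proved, stated in full; the proofs are below) =====
def Claim_equal_determine_overall_trend_py : Prop := ∀ (metrics : List (String × List (String × String))), Dom_determine_overall_trend_py metrics → Spec_determine_overall_trend_py metrics (determine_overall_trend_py metrics)

-- ===== LEMMAS AND PROOFS =====

-- the list of trend values both programs extract
def pvTrends (metrics : List (String × List (String × String))) : List String :=
  metrics.filterMap (fun md => (PySem.Dict.mk md.2).get? "trend")

lemma pvFoldA (metrics : List (String × List (String × String))) (acc : List String) :
    metrics.foldl (fun acc md =>
      match (PySem.Dict.mk md.2).get? "trend" with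
      | some t => acc ++ [t]
      | none => acc) acc = acc ++ pvTrends metrics := by
  induction metrics generalizing acc with
  | nil => simp [pvTrends]
  | cons md rest ih =>
    simp only [List.foldl_cons, pvTrends, List.filterMap_cons]
    cases h : (PySem.Dict.mk md.2).get? "trend" with
    | none => simpa [pvTrends] using ih acc
    | some t => simpa [pvTrends] using ih (acc ++ [t])

lemma pvFoldB (metrics : List (String × List (String × String))) (s : Bool) (n : Int) :
    metrics.foldl (fun (st : Bool × Int) md =>
      match (PySem.Dict.mk md.2).get? "trend" with
      | some t => (true, st.2 + (if t = "improving" then 1 else if t = "declining" then -1 else 0))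
      | none => st) (s, n)
    = (s || !(pvTrends metrics).isEmpty,
       n + ((pvTrends metrics).count "improving" : Int) - ((pvTrends metrics).count "declining" : Int)) := by
  induction metrics generalizing s n with
  | nil => simp [pvTrends]
  | cons md rest ih =>
    simp only [List.foldl_cons, pvTrends, List.filterMap_cons]
    cases h : (PySem.Dict.mk md.2).get? "trend" with
    | none => simpa [pvTrends] using ih s n
    | some t =>
      rw [ih]
      simp only [pvTrends, List.isEmpty_cons, List.count_cons, Bool.true_or]
      by_cases h1 : t = "improving" <;> by_cases h2 : t = "declining" <;>
        simp_all [beq_iff_eq] <;> ring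

-- ===== VERDICT (by name: the statement is the Claim_ definition above) =====
theorem determine_overall_trend_py_spec : Claim_equal_determine_overall_trend_py := by
  intro metrics _
  unfold Spec_determine_overall_trend_py determine_overall_trend_py determine_overall_trend_py_alt
  rw [pvFoldA, pvFoldB]
  simp only [List.nil_append, Bool.false_or]
  cases hE : (pvTrends metrics).isEmpty with
  | true =>
    simp_all [List.isEmpty_iff]
  | false =>
    have hne : pvTrends metrics ≠ [] := by
      intro h; rw [h] at hE; simp at hE
    simp only [if_neg hne, Bool.not_false, PySem.List.count_eq]
    split_ifs with h1 h2 h3 h4 h5 <;> first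
      | rfl
      | (exfalso; omega)
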